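-- pv_equiv track=rewrite | github.com/ryanbutbored/ComputingProject | textEncryption.py | getSixBitFromFull
-- ===== SOURCE A (Python) =====
-- from string import ascii_uppercase as up, ascii_lowercase as low
--
-- full = ". " +low +up +"0123456789"
--
-- def getSixBitFromFull(c):
--     index = full.index(c)
--     data = ""
--     values = [32, 16, 8, 4, 2, 1]
--     for n in values:
--         if index >= n:
--             data += "1"
--             index -= n
--         else:
--             data += "0"
--     return data
-- ===== SOURCE B (Python) =====
-- from string import ascii_uppercase as up, ascii_lowercase as low
--
-- full = ". " + low + up + "0123456789"
--
-- def getSixBitFromFull(c):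
--     return format(full.index(c), '06b')
-- ===== Notes on version B (the rewrite author's own statement) =====
-- stated objective: idiomatic
-- what changed: The greedy subtract-powers-of-two accumulation loop is replaced by a single format call producing the zero-padded six-digit binary representation of the alphabet index, exact because every index in the 64-character alphabet fits in six bits.
import Mathlib
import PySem

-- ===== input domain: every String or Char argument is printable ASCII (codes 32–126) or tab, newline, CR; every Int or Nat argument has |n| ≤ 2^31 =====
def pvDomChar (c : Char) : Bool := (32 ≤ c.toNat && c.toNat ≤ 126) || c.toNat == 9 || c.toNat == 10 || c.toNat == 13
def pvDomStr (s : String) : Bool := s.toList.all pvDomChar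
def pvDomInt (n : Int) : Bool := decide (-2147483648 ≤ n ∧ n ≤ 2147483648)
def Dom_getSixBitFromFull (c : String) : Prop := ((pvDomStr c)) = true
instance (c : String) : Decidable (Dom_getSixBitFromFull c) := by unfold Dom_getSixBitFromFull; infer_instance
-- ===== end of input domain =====

-- B replaces A's greedy subtract-powers-of-two loop by direct binary conversion with
-- zero-padding to width 6 (Python's format(idx, '06b')); idiomatic, same cost.

-- the module constant: full = ". " + lowercase + uppercase + "0123456789"
def pvFull : String := ". abcdefghijklmnopqrstuvwxyzABCDEFGHIJKLMNOPQRSTUVWXYZ0123456789"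

-- ===== PORT A =====
-- A's loop over values = [32,16,8,4,2,1], appending '1'/'0' and subtracting
def getSixBitFromFull (c : String) : String :=
  let index := PySem.Str.find pvFull c  -- full.index(c); under Pre_ this is the index (no ValueError)
  let st := ([32, 16, 8, 4, 2, 1] : List Int).foldl
    (fun (st : List Char × Int) n =>
      if st.2 ≥ n then (st.1 ++ ['1'], st.2 - n) else (st.1 ++ ['0'], st.2))
    ([], index)
  String.mk st.1

-- ===== PORT B =====
-- format(i, '06b'): binary digits (Nat.toDigits 2) with zero-padding to width 6
def getSixBitFromFull_alt (c : String) : String :=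
  let i := PySem.Str.find pvFull c  -- full.index(c); under Pre_ this is the index (no ValueError)
  let bits := Nat.toDigits 2 i.toNat
  String.mk (List.replicate (6 - bits.length) '0' ++ bits)

-- ===== PRECONDITION & SPEC =====
-- Pre_ excludes exactly the inputs where full.index(c) raises ValueError: c not a substring of full
def Pre_getSixBitFromFull (c : String) : Prop := PySem.Str.isIn c pvFull = true
instance (c : String) : Decidable (Pre_getSixBitFromFull c) := by unfold Pre_getSixBitFromFull; infer_instance
def pvWitness_getSixBitFromFull : String := "k"

def Spec_getSixBitFromFull (c : String) (out : String) : Prop := out = getSixBitFromFull_alt c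
instance (c : String) (out : String) : Decidable (Spec_getSixBitFromFull c out) := by unfold Spec_getSixBitFromFull; infer_instance

-- ===== CLAIM (what is proved, stated in full; the proofs are below) =====
def Claim_equal_getSixBitFromFull : Prop := ∀ (c : String), Dom_getSixBitFromFull c → Pre_getSixBitFromFull c → Spec_getSixBitFromFull c (getSixBitFromFull c)

-- ===== LEMMAS AND PROOFS =====

-- under Pre_, the found index lies in [0, 63]
theorem pvFind_bounds (c : String) (h : Pre_getSixBitFromFull c) :
    0 ≤ PySem.Str.find pvFull c ∧ PySem.Str.find pvFull c ≤ 63 := by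
  have hinf : c.toList <:+: pvFull.toList := (PySem.Str.isIn_iff_infix _ _).mp h
  have h0 : 0 ≤ PySem.Str.find pvFull c := by
    rw [PySem.Str.find_nonneg_iff]; exact hinf
  refine ⟨h0, ?_⟩
  rw [PySem.Str.find_eq] at h0 ⊢
  have hlen : pvFull.toList.length = 64 := by decide
  have hle : PySem.Chars.find pvFull.toList c.toList ≤ 64 := by
    have := PySem.Chars.find_le_length pvFull.toList c.toList
    omega
  by_contra hgt
  have h64 : PySem.Chars.find pvFull.toList c.toList = 64 := by omega
  have hspec := (PySem.Chars.find_spec h0).1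
  rw [h64] at hspec
  have hdrop : List.drop 64 pvFull.toList = [] := by decide
  rw [show ((64:Int).toNat) = 64 from rfl, hdrop, List.prefix_nil] at hspec
  rw [hspec] at h64
  rw [PySem.Chars.find_nil] at h64
  omega

-- the two ways of producing six bits agree for every index 0..63
theorem pvCore (k : Fin 64) :
    (([32, 16, 8, 4, 2, 1] : List Int).foldl
      (fun (st : List Char × Int) n =>
        if st.2 ≥ n then (st.1 ++ ['1'], st.2 - n) else (st.1 ++ ['0'], st.2))
      ([], (k : Int))).1
    = List.replicate (6 - (Nat.toDigits 2 k).length) '0' ++ Nat.toDigits 2 k := by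
  revert k; decide

-- ===== VERDICT (by name: the statement is the Claim_ definition above) =====
theorem getSixBitFromFull_spec : Claim_equal_getSixBitFromFull := by
  intro c _ hpre
  unfold Spec_getSixBitFromFull getSixBitFromFull getSixBitFromFull_alt
  obtain ⟨h0, h63⟩ := pvFind_bounds c hpre
  set i := PySem.Str.find pvFull c with hi
  simp only
  have hk : ((i.toNat : Int)) = i := by omega
  rw [← hk]
  exact congrArg String.mk (pvCore ⟨i.toNat, by omega⟩)
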